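-- pv_equiv track=rewrite | github.com/zeniverse/-algorithm-practice | Programmers/Level0/이차원 배열 대각선 순회하기.py | solution
-- ===== SOURCE A (Python) =====
-- def solution(board, k):
--     res = 0
--     n = len(board)
--     m = len(board[0])
--
--     for i in range(n):
--         for j in range(m):
--             if i + j <= k:
--                 res += board[i][j]
--     return res
-- ===== SOURCE B (Python) =====
-- def solution(board, k):
--     m = len(board[0])
--     total = 0
--     for i, row in enumerate(board):
--         c = min(m, k - i + 1)
--         if c > 0:
--             total += sum(row[:c])
--     return total
-- ===== Notes on version B (the rewrite author's own statement) =====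
-- stated objective: simpler
-- what changed: Replaces the nested row-major scan with an i+j<=k guard on every cell by a single pass over rows that adds sum(row[:min(m, k-i+1)]), eliminating the inner loop and the per-cell conditional.
import Mathlib
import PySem

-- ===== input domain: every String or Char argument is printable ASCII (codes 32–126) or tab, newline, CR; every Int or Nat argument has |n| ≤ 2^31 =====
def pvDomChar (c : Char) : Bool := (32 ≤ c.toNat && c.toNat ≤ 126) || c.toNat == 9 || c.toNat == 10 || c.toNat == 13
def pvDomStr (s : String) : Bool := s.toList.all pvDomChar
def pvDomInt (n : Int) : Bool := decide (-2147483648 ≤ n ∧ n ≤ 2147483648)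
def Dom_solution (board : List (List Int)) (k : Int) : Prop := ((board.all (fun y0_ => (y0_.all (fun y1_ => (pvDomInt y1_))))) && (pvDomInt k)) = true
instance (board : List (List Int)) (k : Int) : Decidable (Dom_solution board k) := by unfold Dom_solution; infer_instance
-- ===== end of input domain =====

-- B replaces A's row-major scan with an i+j<=k guard by a per-row prefix sum sum(row[:min(m, k-i+1)]): same value, different decomposition (objective: simpler).

-- ===== PORT A =====
def solution (board : List (List Int)) (k : Int) : Int :=
  let n := board.length
  let m := ((PySem.List.pyGet? board 0).getD []).length
  (PySem.List.pyRange 0 n 1).foldl (fun res i =>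
    (PySem.List.pyRange 0 m 1).foldl (fun res j =>
      if i + j ≤ k then res + PySem.List.pyGetD (PySem.List.pyGetD board i []) j 0 else res) res) 0

-- ===== PORT B =====
def solution_alt (board : List (List Int)) (k : Int) : Int :=
  let m := (((PySem.List.pyGet? board 0).getD []).length : Int)
  (PySem.List.enumerate board).foldl (fun total p =>
    let c := min m (k - p.1 + 1)
    if 0 < c then total + (PySem.List.slice p.2 none (some c)).sum else total) 0

-- ===== PRECONDITION & SPEC =====
-- Pre_ excludes exactly the inputs where A raises IndexError: the empty board (len(board[0])),
-- and ragged boards where some row i is shorter than the prefix min(m, k-i+1) that A indexes into.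
def Pre_solution (board : List (List Int)) (k : Int) : Prop :=
  board ≠ [] ∧ ∀ i < board.length,
    min (((board.headD []).length : Int)) (k - (i : Int) + 1) ≤ ((board.getD i []).length : Int)
      ∨ k - (i : Int) + 1 ≤ 0
instance (board : List (List Int)) (k : Int) : Decidable (Pre_solution board k) := by unfold Pre_solution; infer_instance
def pvWitness_solution : List (List Int) × Int := ([[1, 2], [3, 4]], 1)

def Spec_solution (board : List (List Int)) (k : Int) (out : Int) : Prop := out = solution_alt board k
instance (board : List (List Int)) (k : Int) (out : Int) : Decidable (Spec_solution board k out) := by unfold Spec_solution; infer_instance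

-- ===== CLAIM (what is proved, stated in full; the proofs are below) =====
def Claim_equal_solution : Prop := ∀ (board : List (List Int)) (k : Int), Dom_solution board k → Pre_solution board k → Spec_solution board k (solution board k)

-- ===== LEMMAS AND PROOFS =====

theorem filter_range_lt (m t : Nat) : (List.range m).filter (fun j => decide (j < t)) = List.range (min m t) := by
  induction m with
  | zero => simp
  | succ m ih =>
    rw [List.range_succ, List.filter_append, ih]
    by_cases h : m < t
    · have h3 : min m t = m := by omega
      simp [h, h3, List.range_succ]
    · have : min (m+1) t = min m t := by omega
      simp [h, this]
theorem take_eq_map_range_getD (row : List Int) (r : Nat) (h : r ≤ row.length) :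
    (List.range r).map (fun j => row.getD j 0) = row.take r := by
  apply List.ext_getElem
  · simp; omega
  · intro i h1 h2
    simp at h1 ⊢
    rw [List.getElem?_eq_getElem (by omega)]
    simp

theorem row_lemma (row : List Int) (m : Nat) (i k res : Int)
    (hpre : min ((m : Int)) (k - i + 1) ≤ (row.length : Int) ∨ k - i + 1 ≤ 0) :
    (PySem.List.pyRange 0 (m : Int) 1).foldl (fun res j =>
      if i + j ≤ k then res + PySem.List.pyGetD row j 0 else res) res
    = (if 0 < min ((m : Int)) (k - i + 1) then
        res + (PySem.List.slice row none (some (min ((m : Int)) (k - i + 1)))).sum else res) := by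
  rw [PySem.List.foldl_ite_eq_foldl_filter (p := fun j => i + j ≤ k)
        (f := fun res j => res + PySem.List.pyGetD row j 0),
      PySem.List.foldl_add, PySem.List.pyRange_zero_natCast, List.filter_map]
  have hfc : (List.range m).filter (fun j : Nat => decide (i + (j : Int) ≤ k))
      = List.range (min m (k - i + 1).toNat) := by
    rw [← filter_range_lt]
    apply List.filter_congr
    intro j _
    simp only [decide_eq_decide]
    omega
  simp only [Function.comp_def]
  rw [hfc, List.map_map]
  have hmap : (List.range (min m (k - i + 1).toNat)).map
      ((fun j : Int => PySem.List.pyGetD row j 0) ∘ (fun j : Nat => (j : Int)))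
      = (List.range (min m (k - i + 1).toNat)).map (fun j : Nat => row.getD j 0) := by
    apply List.map_congr_left; intro j _
    simp [PySem.List.pyGetD_natCast]
  rw [hmap]
  by_cases hpos : 0 < min ((m : Int)) (k - i + 1)
  · have hd : min ((m : Int)) (k - i + 1) ≤ (row.length : Int) := by
      rcases hpre with h | h
      · exact h
      · omega
    have hr : min m (k - i + 1).toNat = (min ((m : Int)) (k - i + 1)).toNat := by omega
    rw [hr, take_eq_map_range_getD row _ (by omega),
        PySem.List.slice_to row (le_of_lt hpos)]
    simp [hpos]
  · have hz : min m (k - i + 1).toNat = 0 := by omega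
    simp [hz, hpos]

lemma head_get0 (board : List (List Int)) :
    (PySem.List.pyGet? board 0).getD [] = board.headD [] := by
  rw [PySem.List.pyGet?_zero]
  cases board <;> simp

-- ===== VERDICT (by name: the statement is the Claim_ definition above) =====
theorem solution_spec : Claim_equal_solution := by
  intro board k _ hpre
  obtain ⟨hne, hrows⟩ := hpre
  unfold Spec_solution solution solution_alt
  rw [PySem.List.enumerate_eq_map_pyRange board [], List.foldl_map]
  have hlen : PySem.List.len board = ((board.length : Nat) : Int) := rfl
  rw [hlen]
  apply PySem.List.foldl_congr_mem'
  intro x hx acc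
  rw [PySem.List.mem_pyRange_one] at hx
  have hx0 : (0:Int) ≤ x := hx.1
  have hxn : x.toNat < board.length := by omega
  have hrow : PySem.List.pyGetD board x [] = board.getD x.toNat [] :=
    PySem.List.pyGetD_of_nonneg board [] hx0
  have hx' : ((x.toNat : Nat) : Int) = x := by omega
  have hp := hrows x.toNat hxn
  rw [hx'] at hp
  rw [head_get0] at *
  rw [hrow]
  exact row_lemma (board.getD x.toNat []) (board.headD []).length x k acc hp
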